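-- pv_equiv track=rewrite | github.com/Mayaaa311/LLMBugScanner | data_full/CVE_label/labeling.py | label_cve_ids
-- ===== SOURCE A (Python) =====
-- def label_cve_ids(data):
--     # Initialize lists for each label
--     integer_overflow = []
--     wrong_logic = []
--     bad_randomness = []
--     access_control = []
--     typo_constructor = []
--     token_devalue = []
--     manual_labeling = []
--
--     # Define the labels to search for
--     labels = {
--         "Integer Overflow": integer_overflow,
--         "Wrong Logic": wrong_logic,
--         "Bad Randomness": bad_randomness,
--         "Access Control": access_control,
--         "Typo Constructor": typo_constructor,
--         "Token Devalue": token_devalue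
--     }
--
--     # Iterate over each CVE and description
--     for cve_id, description in data.items():
--         found_label = False
--
--         # Check for each label in the description
--         for label, label_list in labels.items():
--             if label.lower() in description.lower():
--                 label_list.append(cve_id)
--                 found_label = True
--                 break
--
--         # If no label was found, add to manual labeling list
--         if not found_label:
--             manual_labeling.append(cve_id)
--
--     # Return the lists
--     return {
--         "Integer Overflow": integer_overflow,
--         "Wrong Logic": wrong_logic,
--         "Bad Randomness": bad_randomness,
--         "Access Control": access_control,
--         "Typo Constructor": typo_constructor,
--         "Token Devalue": token_devalue,
--         "Manual Labeling": manual_labeling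
--     }
-- ===== SOURCE B (Python) =====
-- def label_cve_ids(data):
--     names = ["Integer Overflow", "Wrong Logic", "Bad Randomness",
--              "Access Control", "Typo Constructor", "Token Devalue"]
--     items = list(data.items())
--     assigned = set()
--     result = {}
--     for name in names:
--         low = name.lower()
--         bucket = []
--         for i, (cve_id, description) in enumerate(items):
--             if i not in assigned and low in description.lower():
--                 bucket.append(cve_id)
--                 assigned.add(i)
--         result[name] = bucket
--     result["Manual Labeling"] = [cve_id for i, (cve_id, _) in enumerate(items)
--                                  if i not in assigned]
--     return result
-- ===== Notes on version B (the rewrite author's own statement) =====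
-- stated objective: alternative
-- what changed: B inverts the loop nesting: instead of scanning the label list per CVE with a break (A), it makes one pass over the data per label in priority order, using a set of already-claimed indices to enforce first-match priority, and collects the unclaimed ids as Manual Labeling at the end.
import Mathlib
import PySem

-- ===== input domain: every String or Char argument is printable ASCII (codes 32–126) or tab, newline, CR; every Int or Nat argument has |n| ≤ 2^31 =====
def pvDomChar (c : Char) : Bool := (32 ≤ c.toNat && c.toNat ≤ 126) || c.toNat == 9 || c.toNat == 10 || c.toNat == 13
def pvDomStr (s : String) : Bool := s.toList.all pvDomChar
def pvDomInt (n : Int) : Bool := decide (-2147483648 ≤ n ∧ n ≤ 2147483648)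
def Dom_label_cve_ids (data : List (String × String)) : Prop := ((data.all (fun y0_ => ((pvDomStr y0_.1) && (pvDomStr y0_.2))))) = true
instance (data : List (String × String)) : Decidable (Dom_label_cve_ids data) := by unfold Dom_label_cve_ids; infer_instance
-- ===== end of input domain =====

-- B inverts the loop nesting: it scans the data once per label (in priority order) with a
-- set of already-claimed indices, instead of A's per-item scan over the label dict with break.
-- Objective: alternative decomposition; return value proved identical.

-- ===== PORT A =====
-- inner 'for label, label_list in labels.items(): … break' — returns the updated dict at the
-- first matching label, or none when no label matches
def pvAFind (cve_id description : String) (d : PySem.Dict String (List String))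
    (items : List (String × List String)) : Option (PySem.Dict String (List String)) :=
  match items with
  | [] => none
  | (label, _) :: rest =>
      if PySem.Str.isIn (PySem.Str.lower label) (PySem.Str.lower description) then
        some (d.modify label [] (fun l => l ++ [cve_id]))
      else pvAFind cve_id description d rest

-- one iteration of 'for cve_id, description in data.items()'
def pvAStep (st : PySem.Dict String (List String) × List String) (p : String × String) :
    PySem.Dict String (List String) × List String :=
  match pvAFind p.1 p.2 st.1 st.1.items with
  | some d' => (d', st.2)
  | none => (st.1, st.2 ++ [p.1])

def label_cve_ids (data : List (String × String)) : List (String × List String) :=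
  let labels : PySem.Dict String (List String) := PySem.Dict.ofList
    [("Integer Overflow", []), ("Wrong Logic", []), ("Bad Randomness", []),
     ("Access Control", []), ("Typo Constructor", []), ("Token Devalue", [])]
  let st := data.foldl pvAStep (labels, [])
  [("Integer Overflow", st.1.getD "Integer Overflow" []),
   ("Wrong Logic", st.1.getD "Wrong Logic" []),
   ("Bad Randomness", st.1.getD "Bad Randomness" []),
   ("Access Control", st.1.getD "Access Control" []),
   ("Typo Constructor", st.1.getD "Typo Constructor" []),
   ("Token Devalue", st.1.getD "Token Devalue" []),
   ("Manual Labeling", st.2)]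

-- ===== PORT B =====
def pvBNames : List String :=
  ["Integer Overflow", "Wrong Logic", "Bad Randomness",
   "Access Control", "Typo Constructor", "Token Devalue"]

-- one pass 'for i, (cve_id, description) in enumerate(items): …' for a single label
def pvBPass (low : String) (items : List (Int × (String × String)))
    (assigned : PySem.Set Int) (bucket : List String) : List String × PySem.Set Int :=
  match items with
  | [] => (bucket, assigned)
  | (i, p) :: rest =>
      if !(PySem.Set.contains assigned i) && PySem.Str.isIn low (PySem.Str.lower p.2) then
        pvBPass low rest (PySem.Set.add assigned i) (bucket ++ [p.1])
      else pvBPass low rest assigned bucket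

-- 'for name in names: …'
def pvBLoop (ns : List String) (items : List (Int × (String × String)))
    (assigned : PySem.Set Int) : List (String × List String) × PySem.Set Int :=
  match ns with
  | [] => ([], assigned)
  | n :: rest =>
      let r := pvBPass (PySem.Str.lower n) items assigned []
      let r' := pvBLoop rest items r.2
      ((n, r.1) :: r'.1, r'.2)

def label_cve_ids_alt (data : List (String × String)) : List (String × List String) :=
  let items := PySem.List.enumerate data 0
  let r := pvBLoop pvBNames items PySem.Set.empty
  r.1 ++ [("Manual Labeling",
    (items.filter (fun p => !(PySem.Set.contains r.2 p.1))).map (fun p => p.2.1))]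

-- ===== PRECONDITION & SPEC =====
def Spec_label_cve_ids (data : List (String × String)) (out : List (String × List String)) : Prop := out = label_cve_ids_alt data
instance (data : List (String × String)) (out : List (String × List String)) : Decidable (Spec_label_cve_ids data out) := by unfold Spec_label_cve_ids; infer_instance

-- ===== CLAIM (what is proved, stated in full; the proofs are below) =====
def Claim_equal_label_cve_ids : Prop := ∀ (data : List (String × String)), Dom_label_cve_ids data → Spec_label_cve_ids data (label_cve_ids data)

-- ===== LEMMAS AND PROOFS =====

def pvM (n desc : String) : Bool := PySem.Str.isIn (PySem.Str.lower n) (PySem.Str.lower desc)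
def pvNames : List String :=
  ["Integer Overflow", "Wrong Logic", "Bad Randomness",
   "Access Control", "Typo Constructor", "Token Devalue"]
def pvFirst (desc : String) : Option String := pvNames.find? (fun n => pvM n desc)
def pvClaimed (prev : List String) (desc : String) : Bool := prev.any (fun n => pvM n desc)
def pvBuckets (prev ns : List String) (data : List (String × String)) :
    List (String × List String) :=
  match ns with
  | [] => []
  | n :: rest =>
      (n, (data.filter (fun p => pvM n p.2 && !pvClaimed prev p.2)).map (fun p => p.1))
        :: pvBuckets (prev ++ [n]) rest data

theorem pvContains_add (s : PySem.Set Int) (x y : Int) :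
    (PySem.Set.add s x).contains y = (PySem.Set.contains s y || y == x) := by
  rw [Bool.eq_iff_iff]
  simp [PySem.Set.contains_iff, PySem.Set.mem_add]

theorem pvPassContains (low : String) (items : List (Int × (String × String))) :
    ∀ (a : PySem.Set Int) (b : List String) (i : Int),
      ((pvBPass low items a b).2).contains i
        = (a.contains i || items.any (fun p => p.1 == i && PySem.Str.isIn low (PySem.Str.lower p.2.2))) := by
  induction items with
  | nil => intro a b i; simp [pvBPass]
  | cons h t ih =>
    intro a b i
    obtain ⟨j, p⟩ := h
    simp only [pvBPass, List.any_cons]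
    split_ifs with hc
    · rw [ih, pvContains_add]
      by_cases hij : i = j
      · subst hij
        simp only [Bool.and_eq_true, Bool.not_eq_eq_eq_not, Bool.not_true] at hc
        have hc2 := hc.2
        simp at hc2
        simp [hc2]
      · have hji : (j == i) = false := by simp [Ne.symm hij]
        have hij' : (i == j) = false := by simp [hij]
        simp [hji, hij']
    · rw [ih]
      by_cases hij : i = j
      · subst hij
        rcases hca : PySem.Set.contains a i with _ | _
        · have hm : PySem.Str.isIn low (PySem.Str.lower p.2) = false := by
            rcases hm' : PySem.Str.isIn low (PySem.Str.lower p.2) with _ | _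
            · rfl
            · exact absurd (by simp only [hm', hca, Bool.not_false, Bool.and_true]) hc
          simp at hm
          simp [hm]
        · simp
      · have hji : (j == i) = false := by simp [Ne.symm hij]
        simp [hji]

theorem pvPassBucket (low : String) (items : List (Int × (String × String))) :
    ∀ (a : PySem.Set Int) (b : List String),
      items.Pairwise (fun p q => p.1 ≠ q.1) →
      (pvBPass low items a b).1 =
        b ++ (items.filter (fun p =>
          !(a.contains p.1) && PySem.Str.isIn low (PySem.Str.lower p.2.2))).map (fun p => p.2.1) := by
  induction items with
  | nil => intro a b _; simp [pvBPass]
  | cons h t ih =>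
    intro a b hpw
    obtain ⟨j, p⟩ := h
    rw [List.pairwise_cons] at hpw
    simp only [pvBPass]
    split_ifs with hc
    · rw [ih _ _ hpw.2]
      have hfc : t.filter (fun q =>
            !((PySem.Set.add a j).contains q.1) && PySem.Str.isIn low (PySem.Str.lower q.2.2))
          = t.filter (fun q => !(a.contains q.1) && PySem.Str.isIn low (PySem.Str.lower q.2.2)) := by
        apply List.filter_congr
        intro q hq
        have : (q.1 == j) = false := by simp [Ne.symm (hpw.1 q hq)]
        rw [pvContains_add]
        simp [this]
      rw [hfc, List.filter_cons_of_pos (by simpa using hc)]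
      simp
    · rw [ih _ _ hpw.2, List.filter_cons_of_neg (by simpa using hc)]

theorem pvAny_merge {α : Type} (l : List α) (c x y : α → Bool) :
    ((l.any fun q => c q && x q) || (l.any fun q => c q && y q))
      = l.any (fun q => c q && (x q || y q)) := by
  rw [Bool.eq_iff_iff]
  simp only [Bool.or_eq_true, List.any_eq_true, Bool.and_eq_true]
  constructor
  · rintro (⟨q, hq, hc, hx⟩ | ⟨q, hq, hc, hy⟩)
    · exact ⟨q, hq, hc, by simp [hx]⟩
    · exact ⟨q, hq, hc, by simp [hy]⟩
  · rintro ⟨q, hq, hc, hxy⟩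
    rcases hxy with h | h
    · exact Or.inl ⟨q, hq, hc, h⟩
    · exact Or.inr ⟨q, hq, hc, h⟩

theorem pvAnyKey {α : Type} (items : List (Int × α)) (p : Int × α) (r : Int × α → Bool) :
    items.Pairwise (fun p q => p.1 ≠ q.1) → p ∈ items →
    items.any (fun q => q.1 == p.1 && r q) = r p := by
  induction items with
  | nil => intro _ h; simp at h
  | cons h t ih =>
    intro hpw hp
    rw [List.pairwise_cons] at hpw
    rcases List.mem_cons.mp hp with hp | hp
    · subst hp
      have ht : t.any (fun q => q.1 == p.1 && r q) = false := by
        rw [List.any_eq_false]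
        intro q hq
        simp [Ne.symm (hpw.1 q hq)]
      simp [List.any_cons, ht]
    · have hh : (h.1 == p.1) = false := by simp [hpw.1 p hp]
      simp [List.any_cons, hh, ih hpw.2 hp]

def pvBucketsI (prev ns : List String) (items : List (Int × (String × String))) :
    List (String × List String) :=
  match ns with
  | [] => []
  | n :: rest =>
      (n, (items.filter (fun p => pvM n p.2.2 && !pvClaimed prev p.2.2)).map (fun p => p.2.1))
        :: pvBucketsI (prev ++ [n]) rest items

theorem pvLoop (items : List (Int × (String × String)))
    (hpw : items.Pairwise (fun p q => p.1 ≠ q.1)) :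
    ∀ (ns prev : List String) (a : PySem.Set Int),
      (∀ i, a.contains i = items.any (fun p => p.1 == i && pvClaimed prev p.2.2)) →
      ((pvBLoop ns items a).1 = pvBucketsI prev ns items ∧
       (∀ i, ((pvBLoop ns items a).2).contains i
          = items.any (fun p => p.1 == i && pvClaimed (prev ++ ns) p.2.2))) := by
  intro ns
  induction ns with
  | nil =>
    intro prev a ha
    simpa [pvBLoop, pvBucketsI] using ha
  | cons n rest ih =>
    intro prev a ha
    simp only [pvBLoop, pvBucketsI]
    have hbucket : (pvBPass (PySem.Str.lower n) items a []).1 =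
        (items.filter (fun p => pvM n p.2.2 && !pvClaimed prev p.2.2)).map (fun p => p.2.1) := by
      rw [pvPassBucket _ _ _ _ hpw]
      rw [List.nil_append]
      congr 1
      apply List.filter_congr
      intro p hp
      rw [ha p.1]
      rw [pvAnyKey items p _ hpw hp]
      rw [Bool.and_comm]
      rfl
    have hcont : ∀ i, ((pvBPass (PySem.Str.lower n) items a []).2).contains i
        = items.any (fun p => p.1 == i && pvClaimed (prev ++ [n]) p.2.2) := by
      intro i
      rw [pvPassContains, ha i, pvAny_merge]
      refine List.any_congr rfl ?_
      intro q
      have : pvClaimed (prev ++ [n]) q.2.2 = (pvClaimed prev q.2.2 || pvM n q.2.2) := by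
        simp [pvClaimed, pvM]
      rw [this]
      rfl
    obtain ⟨ih1, ih2⟩ := ih (prev ++ [n]) _ hcont
    refine ⟨by rw [hbucket, ih1], ?_⟩
    intro i
    rw [ih2 i]
    simp

theorem pvAFind_eq (c desc : String) (d : PySem.Dict String (List String))
    (items : List (String × List String)) :
    pvAFind c desc d items =
      ((items.map Prod.fst).find? (fun L => pvM L desc)).map
        (fun L => d.modify L [] (fun l => l ++ [c])) := by
  induction items with
  | nil => rfl
  | cons h t ih =>
    obtain ⟨label, v⟩ := h
    simp only [pvAFind, List.map_cons, List.find?_cons]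
    by_cases hm : pvM label desc
    · simp [pvM] at hm; simp [hm, pvM]
    · simp [pvM] at hm; simp [hm, ih, pvM]

theorem pvFoldA (data : List (String × String)) :
    ∀ (d : PySem.Dict String (List String)) (m : List String), d.keys = pvNames →
      ((data.foldl pvAStep (d, m)).1.keys = pvNames ∧
       (∀ n, (data.foldl pvAStep (d, m)).1.getD n [] =
          d.getD n [] ++ (data.filter (fun p => pvFirst p.2 = some n)).map (fun p => p.1)) ∧
       (data.foldl pvAStep (d, m)).2 =
          m ++ (data.filter (fun p => pvFirst p.2 = none)).map (fun p => p.1)) := by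
  induction data with
  | nil => intro d m hk; simp [hk]
  | cons p t ih =>
    intro d m hk
    have hfind : pvAFind p.1 p.2 d d.items =
        (pvFirst p.2).map (fun L => d.modify L [] (fun l => l ++ [p.1])) := by
      rw [pvAFind_eq]
      have : d.items.map Prod.fst = pvNames := hk
      rw [this]; rfl
    cases hf : pvFirst p.2 with
    | none =>
      have hstep : pvAStep (d, m) p = (d, m ++ [p.1]) := by
        simp [pvAStep, hfind, hf]
      simp only [List.foldl_cons, hstep]
      obtain ⟨k1, k2, k3⟩ := ih d (m ++ [p.1]) hk
      refine ⟨k1, ?_, ?_⟩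
      · intro n; rw [k2 n]; simp [List.filter_cons, hf]
      · rw [k3]; simp [List.filter_cons, hf]
    | some L =>
      have hL : L ∈ pvNames := List.mem_of_find?_eq_some hf
      have hcont : d.contains L = true := by
        rw [PySem.Dict.contains_iff_mem_keys, hk]; exact hL
      have hstep : pvAStep (d, m) p = (d.insert L (d.getD L [] ++ [p.1]), m) := by
        simp [pvAStep, hfind, hf]; rfl
      simp only [List.foldl_cons, hstep]
      have hk' : (d.insert L (d.getD L [] ++ [p.1])).keys = pvNames := by
        rw [PySem.Dict.keys_insert_of_contains d _ hcont, hk]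
      obtain ⟨k1, k2, k3⟩ := ih _ m hk'
      refine ⟨k1, ?_, ?_⟩
      · intro n; rw [k2 n, PySem.Dict.getD_insert]
        by_cases hn : n = L
        · subst hn; simp [List.filter_cons, hf]
        · have : ¬ (pvFirst p.2 = some n) := by rw [hf]; simp [Ne.symm hn]
          simp [List.filter_cons, hn, this]
      · rw [k3]; simp [List.filter_cons, hf]

theorem label_cve_ids_eq (data : List (String × String)) :
    label_cve_ids data =
      pvNames.map (fun n => (n, (data.filter (fun p => pvFirst p.2 = some n)).map (fun p => p.1)))
        ++ [("Manual Labeling", (data.filter (fun p => pvFirst p.2 = none)).map (fun p => p.1))] := by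
  have h0 : (PySem.Dict.ofList
      [("Integer Overflow", ([] : List String)), ("Wrong Logic", []), ("Bad Randomness", []),
       ("Access Control", []), ("Typo Constructor", []), ("Token Devalue", [])]).keys = pvNames := by
    decide
  obtain ⟨k1, k2, k3⟩ := pvFoldA data _ [] h0
  unfold label_cve_ids
  simp only [pvNames, List.map_cons, List.map_nil, List.cons_append, List.nil_append]
  have hg : ∀ n, (PySem.Dict.ofList
      [("Integer Overflow", ([] : List String)), ("Wrong Logic", []), ("Bad Randomness", []),
       ("Access Control", []), ("Typo Constructor", []), ("Token Devalue", [])]).getD n [] = [] := by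
    intro n
    simp only [PySem.Dict.getD, PySem.Dict.get?]
    rcases h : List.find? (fun p => p.1 == n) (PySem.Dict.ofList
      [("Integer Overflow", ([] : List String)), ("Wrong Logic", []), ("Bad Randomness", []),
       ("Access Control", []), ("Typo Constructor", []), ("Token Devalue", [])]).items with _ | p
    · simp [h]
    · have hm := List.mem_of_find?_eq_some h
      have hit : (PySem.Dict.ofList
          [("Integer Overflow", ([] : List String)), ("Wrong Logic", []), ("Bad Randomness", []),
           ("Access Control", []), ("Typo Constructor", []), ("Token Devalue", [])]).items =
          [("Integer Overflow", ([] : List String)), ("Wrong Logic", []), ("Bad Randomness", []),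
           ("Access Control", []), ("Typo Constructor", []), ("Token Devalue", [])] := by decide
      rw [hit] at hm
      have hp : p.2 = [] := by fin_cases hm <;> rfl
      simp [h, hp]
  rw [k3]
  simp only [k2, hg, List.nil_append]


theorem pvProj (q : String × String → Bool) :
    ∀ (l : List (Int × (String × String))),
      (l.filter (fun p => q p.2)).map (fun p => p.2.1)
        = ((l.map (fun p => p.2)).filter q).map (fun p => p.1) := by
  intro l
  induction l with
  | nil => rfl
  | cons h t ih =>
    by_cases hq : q h.2
    · simp [List.filter_cons, hq, ih]
    · simp only [Bool.not_eq_true] at hq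
      simp [List.filter_cons, hq, ih]

theorem pvBucketsI_proj (data : List (String × String)) :
    ∀ (ns prev : List String),
      pvBucketsI prev ns (PySem.List.enumerate data 0) = pvBuckets prev ns data := by
  intro ns
  induction ns with
  | nil => intro prev; rfl
  | cons n rest ih =>
    intro prev
    simp only [pvBucketsI, pvBuckets, ih]
    congr 1
    rw [pvProj (fun d => pvM n d.2 && !pvClaimed prev d.2) (PySem.List.enumerate data 0)]
    rw [PySem.List.map_snd_enumerate]

theorem label_cve_ids_alt_eq (data : List (String × String)) :
    label_cve_ids_alt data =
      pvBuckets [] pvNames data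
        ++ [("Manual Labeling", (data.filter (fun p => !pvClaimed pvNames p.2)).map (fun p => p.1))] := by
  have hpw : (PySem.List.enumerate data 0).Pairwise (fun p q => p.1 ≠ q.1) :=
    (PySem.List.pairwise_lt_enumerate data 0).imp (fun h => ne_of_lt h)
  have ha0 : ∀ i, (PySem.Set.empty : PySem.Set Int).contains i
      = (PySem.List.enumerate data 0).any (fun p => p.1 == i && pvClaimed [] p.2.2) := by
    intro i; simp [PySem.Set.empty, PySem.Set.contains, pvClaimed]
  obtain ⟨h1, h2⟩ := pvLoop _ hpw pvBNames [] _ ha0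
  simp only [label_cve_ids_alt]
  rw [h1]
  have hman : (PySem.List.enumerate data 0).filter
        (fun p => !(PySem.Set.contains (pvBLoop pvBNames (PySem.List.enumerate data 0) PySem.Set.empty).2 p.1))
      = (PySem.List.enumerate data 0).filter (fun p => !pvClaimed pvNames p.2.2) := by
    apply List.filter_congr
    intro p hp
    rw [h2 p.1, pvAnyKey _ p _ hpw hp]
    rfl
  rw [hman]
  have hB : pvBNames = pvNames := rfl
  rw [hB, pvBucketsI_proj data pvNames []]
  congr 2
  rw [pvProj (fun d => !pvClaimed pvNames d.2) (PySem.List.enumerate data 0),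
    PySem.List.map_snd_enumerate]

theorem pvFirst_none (desc : String) :
    decide (pvFirst desc = none) = !pvClaimed pvNames desc := by
  rw [Bool.eq_iff_iff]
  simp [pvFirst, List.find?_eq_none, pvClaimed, List.any_eq_true]

theorem pvFirst_eq (n : String) (prev rest : List String)
    (h : pvNames = prev ++ n :: rest) (desc : String) :
    decide (pvFirst desc = some n) = (pvM n desc && !pvClaimed prev desc) := by
  have hnd : pvNames.Nodup := by decide
  rw [h] at hnd
  have hnp : n ∉ prev := by
    intro hn
    exact (List.nodup_append.mp hnd).2.2 n hn n List.mem_cons_self rfl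
  have hnr : n ∉ rest := by
    have := (List.nodup_append.mp hnd).2.1
    rw [List.nodup_cons] at this
    exact this.1
  unfold pvFirst
  rw [h, List.find?_append]
  cases hp : pvClaimed prev desc with
  | true =>
    obtain ⟨m, hm, hmm⟩ := List.any_eq_true.mp hp
    have hs : (prev.find? (fun k => pvM k desc)).isSome := by
      rw [List.find?_isSome]; exact ⟨m, hm, hmm⟩
    rcases ho : prev.find? (fun k => pvM k desc) with _ | m'
    · simp [ho] at hs
    · have hm' : m' ∈ prev := List.mem_of_find?_eq_some ho
      have hne : m' ≠ n := fun he => hnp (he ▸ hm')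
      simp [hne]
  | false =>
    have ho : prev.find? (fun k => pvM k desc) = none := by
      rw [List.find?_eq_none]
      intro m hm
      simp only [pvClaimed, List.any_eq_false] at hp
      exact hp m hm
    cases hmn : pvM n desc with
    | true => simp [ho, List.find?_cons, hmn, hp]
    | false =>
      rcases hr : rest.find? (fun k => pvM k desc) with _ | m'
      · simp [ho, List.find?_cons, hmn, hr, hp]
      · have hne : m' ≠ n := fun he => hnr (he ▸ List.mem_of_find?_eq_some hr)
        simp [ho, List.find?_cons, hmn, hr, hne, hp]

theorem pvMapBuckets (data : List (String × String)) :
    ∀ (ns prev : List String), pvNames = prev ++ ns →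
      ns.map (fun n => (n, (data.filter (fun p => pvFirst p.2 = some n)).map (fun p => p.1)))
        = pvBuckets prev ns data := by
  intro ns
  induction ns with
  | nil => intro prev _; rfl
  | cons n rest ih =>
    intro prev h
    simp only [List.map_cons, pvBuckets]
    congr 1
    · congr 1
      congr 1
      apply List.filter_congr
      intro p _
      exact pvFirst_eq n prev rest h p.2
    · exact ih (prev ++ [n]) (by rw [h]; simp)


-- ===== VERDICT (by name: the statement is the Claim_ definition above) =====
theorem label_cve_ids_spec : Claim_equal_label_cve_ids := by
  intro data _
  unfold Spec_label_cve_ids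
  rw [label_cve_ids_eq, label_cve_ids_alt_eq, pvMapBuckets data pvNames [] rfl]
  congr 2
  congr 2
  apply List.filter_congr
  intro p _
  rw [← pvFirst_none p.2]
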